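-- pv_equiv track=rewrite | github.com/Dancesoul/leetcodebywhy | Solutions3.py | minNumBooths
-- ===== SOURCE A (Python) =====
-- from typing import List
--
-- def minNumBooths(demand: List[str]) -> int:
--     """
--     LCP 66. 最小展台数量
--     :param demand:
--     :return:
--     """
--     res = ""
--     for demands in demand:
--         temp = res
--         for word in demands:
--             if word not in res:  # 判断有没有这个类型 没有就加上
--                 res += word
--             elif word not in temp:  # 判断这个类型的台够不够
--                 res += word
--             else:
--                 temp = temp.replace(word, "", 1)  # 当天使用过的台，就去掉
--     return len(res)
-- ===== SOURCE B (Python) =====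
-- def minNumBooths(demand):
--     best = {}
--     for day in demand:
--         counts = {}
--         for ch in day:
--             counts[ch] = counts.get(ch, 0) + 1
--         for ch, k in counts.items():
--             if k > best.get(ch, 0):
--                 best[ch] = k
--     return sum(best.values())
-- ===== Notes on version B (the rewrite author's own statement) =====
-- stated objective: simpler
-- what changed: Replaces A's growing res-string with per-character append/remove-one membership bookkeeping by a per-day frequency dict reduced into a global char->max-count dict whose values are summed; the temp-string consumption loop and substring membership tests disappear.
import Mathlib
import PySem

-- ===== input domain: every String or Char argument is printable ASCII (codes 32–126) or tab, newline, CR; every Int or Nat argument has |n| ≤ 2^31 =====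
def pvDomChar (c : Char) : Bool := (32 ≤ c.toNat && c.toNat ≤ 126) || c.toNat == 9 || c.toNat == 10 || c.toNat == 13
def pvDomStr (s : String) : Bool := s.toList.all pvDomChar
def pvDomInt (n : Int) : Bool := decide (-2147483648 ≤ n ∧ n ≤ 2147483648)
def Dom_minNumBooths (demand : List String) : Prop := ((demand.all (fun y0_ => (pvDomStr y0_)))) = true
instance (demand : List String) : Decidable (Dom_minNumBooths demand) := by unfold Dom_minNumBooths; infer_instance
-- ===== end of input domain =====

-- B replaces A's growing res-string (with its per-day temp consumption loop) by a per-day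
-- frequency dict max-reduced into a global char -> max-count dict whose values are summed (simpler).

-- ===== PORT A =====
-- Strings are ported as their lists of code points. 'word in res' for the single character
-- 'word' is character membership (List.contains); res.replace(word, "", 1) removes the first
-- occurrence of the single character 'word' (no-op if absent), which is exactly List.erase.
def minNumBoothsStep (st : List Char × List Char) (word : Char) : List Char × List Char :=
  if ¬ st.1.contains word then (st.1 ++ [word], st.2)
  else if ¬ st.2.contains word then (st.1 ++ [word], st.2)
  else (st.1, st.2.erase word)

def minNumBoothsDay (res : List Char) (demands : String) : List Char :=
  (demands.toList.foldl minNumBoothsStep (res, res)).1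

def minNumBooths (demand : List String) : Int :=
  ((demand.foldl minNumBoothsDay []).length : Int)

-- ===== PORT B =====
def minNumBoothsUpd (best : PySem.Dict Char Int) (p : Char × Int) : PySem.Dict Char Int :=
  if p.2 > best.getD p.1 0 then best.insert p.1 p.2 else best

def minNumBoothsDayB (best : PySem.Dict Char Int) (day : String) : PySem.Dict Char Int :=
  let counts := day.toList.foldl (fun d ch => d.insert ch (d.getD ch 0 + 1)) PySem.Dict.empty
  counts.items.foldl minNumBoothsUpd best

def minNumBooths_alt (demand : List String) : Int :=
  (demand.foldl minNumBoothsDayB PySem.Dict.empty).values.sum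

-- ===== PRECONDITION & SPEC =====
def Spec_minNumBooths (demand : List String) (out : Int) : Prop := out = minNumBooths_alt demand
instance (demand : List String) (out : Int) : Decidable (Spec_minNumBooths demand out) := by unfold Spec_minNumBooths; infer_instance

-- ===== CLAIM (what is proved, stated in full; the proofs are below) =====
def Claim_equal_minNumBooths : Prop := ∀ (demand : List String), Dom_minNumBooths demand → Spec_minNumBooths demand (minNumBooths demand)

-- ===== LEMMAS AND PROOFS =====

-- the common characterisation: per character, the maximum per-day count, folded over the days
def pvMaxCnt (demand : List String) (c : Char) : Nat :=
  demand.foldl (fun m d => max m (d.toList.count c)) 0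

-- ---- A side: the per-character count of res after a day's inner loop ----

lemma stepA_count (d : List Char) : ∀ res temp : List Char,
    (∀ c, temp.count c ≤ res.count c) → ∀ c,
    ((d.foldl minNumBoothsStep (res, temp)).1).count c
      = res.count c + (d.count c - temp.count c) := by
  induction d with
  | nil => intro res temp h c; simp
  | cons w d ih =>
    intro res temp h c
    simp only [List.foldl_cons, minNumBoothsStep]
    by_cases hr : res.contains w
    · rw [if_neg (not_not_intro hr)]
      by_cases ht : temp.contains w
      · rw [if_neg (not_not_intro ht)]
        rw [ih res (temp.erase w) (by
          intro x
          rcases eq_or_ne x w with rfl | hx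
          · rw [List.count_erase_self]; exact le_trans (Nat.sub_le _ _) (h x)
          · rw [List.count_erase_of_ne hx]; exact h x) c]
        have ht' : 1 ≤ temp.count w := List.one_le_count_iff.mpr (by simpa using ht)
        rcases eq_or_ne c w with rfl | hc
        · rw [List.count_erase_self]; simp; omega
        · rw [List.count_erase_of_ne hc]; simp [Ne.symm hc]
      · rw [if_pos ht]
        rw [ih (res ++ [w]) temp (by
          intro x; refine le_trans (h x) ?_; simp [List.count_append]) c]
        have ht0 : temp.count w = 0 := by
          rw [List.count_eq_zero]; simpa using ht
        rcases eq_or_ne c w with rfl | hc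
        · simp [List.count_append, ht0]; omega
        · simp [List.count_append, Ne.symm hc]
    · rw [if_pos hr]
      rw [ih (res ++ [w]) temp (by
        intro x; refine le_trans (h x) ?_; simp [List.count_append]) c]
      have hr0 : res.count w = 0 := by rw [List.count_eq_zero]; simpa using hr
      have ht0 : temp.count w = 0 := Nat.le_zero.mp (hr0 ▸ h w)
      rcases eq_or_ne c w with rfl | hc
      · simp [List.count_append, ht0]; omega
      · simp [List.count_append, Ne.symm hc]

lemma dayA_count (res : List Char) (s : String) (c : Char) :
    (minNumBoothsDay res s).count c = max (res.count c) (s.toList.count c) := by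
  rw [minNumBoothsDay, stepA_count s.toList res res (fun _ => le_rfl) c]
  omega

lemma foldA_count (demand : List String) (c : Char) :
    (demand.foldl minNumBoothsDay []).count c = pvMaxCnt demand c := by
  rw [pvMaxCnt]
  have : ∀ res : List Char, (demand.foldl minNumBoothsDay res).count c
      = demand.foldl (fun m d => max m (d.toList.count c)) (res.count c) := by
    induction demand with
    | nil => intro res; rfl
    | cons s rest ih => intro res; simp only [List.foldl_cons]; rw [ih, dayA_count]
  simpa using this []

-- ---- B side: the global dict holds per character the max day count so far ----

lemma foldUpd_getD (S : List Char) (dl : List Char) (hS : S.Nodup) : ∀ b : PySem.Dict Char Int, ∀ c,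
    ((S.map (fun k => (k, (dl.count k : Int)))).foldl minNumBoothsUpd b).getD c 0
      = if c ∈ S then max (b.getD c 0) (dl.count c : Int) else b.getD c 0 := by
  induction S with
  | nil => intro b c; simp
  | cons k S ih =>
    intro b c
    have hk : k ∉ S := (List.nodup_cons.mp hS).1
    simp only [List.map_cons, List.foldl_cons]
    have hb : ∀ x, (minNumBoothsUpd b (k, (dl.count k : Int))).getD x 0
        = if x = k then max (b.getD k 0) (dl.count k : Int) else b.getD x 0 := by
      intro x
      simp only [minNumBoothsUpd]
      by_cases hgt : (dl.count k : Int) > b.getD k 0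
      · rw [if_pos hgt, PySem.Dict.getD_insert]
        split_ifs with hx
        · subst hx; omega
        · rfl
      · rw [if_neg hgt]
        split_ifs with hx
        · subst hx; omega
        · rfl
    rw [ih (List.nodup_cons.mp hS).2 _ c, hb c]
    by_cases hcS : c ∈ S
    · rw [if_pos hcS, if_pos (List.mem_cons_of_mem _ hcS)]
      have : c ≠ k := fun h => hk (h ▸ hcS)
      rw [if_neg this]
    · rw [if_neg hcS]
      by_cases hck : c = k
      · subst hck; simp
      · rw [if_neg hck, if_neg (by simp [hck, hcS])]

-- invariant of the global dict: unique keys, nonnegative values, keys are exactly the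
-- characters with a positive stored maximum
def pvInv (b : PySem.Dict Char Int) : Prop :=
  b.keys.Nodup ∧ ∀ c, 0 ≤ b.getD c 0 ∧ (c ∈ b.keys ↔ 0 < b.getD c 0)

lemma updB_inv (b : PySem.Dict Char Int) (p : Char × Int) (h : pvInv b) :
    pvInv (minNumBoothsUpd b p) := by
  obtain ⟨hn, hc⟩ := h
  simp only [minNumBoothsUpd]
  split_ifs with hgt
  · refine ⟨PySem.Dict.nodup_keys_insert b p.1 p.2 hn, fun c => ?_⟩
    rw [PySem.Dict.getD_insert, PySem.Dict.mem_keys_insert]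
    have h0 := (hc p.1).1
    split_ifs with hx
    · subst hx; constructor
      · omega
      · constructor
        · intro _; omega
        · intro _; left; rfl
    · refine ⟨(hc c).1, ?_⟩
      rw [← (hc c).2]
      simp [hx]
  · exact ⟨hn, hc⟩

lemma foldUpd_inv (L : List (Char × Int)) : ∀ b : PySem.Dict Char Int,
    pvInv b → pvInv (L.foldl minNumBoothsUpd b) := by
  induction L with
  | nil => intro b h; exact h
  | cons p L ih => intro b h; exact ih _ (updB_inv b p h)

lemma dayB_getD (b : PySem.Dict Char Int) (s : String) (c : Char)
    (hnn : ∀ x, 0 ≤ b.getD x 0) :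
    (minNumBoothsDayB b s).getD c 0 = max (b.getD c 0) (s.toList.count c : Int) := by
  rw [minNumBoothsDayB]
  rw [show s.toList.foldl (fun d ch => d.insert ch (d.getD ch 0 + 1)) PySem.Dict.empty
      = PySem.Dict.counter s.toList from PySem.Dict.foldl_insert_getD_add_one_eq_counter s.toList]
  rw [PySem.Dict.items_counter]
  rw [foldUpd_getD (PySem.Set.ofList s.toList) s.toList (PySem.Set.nodup_ofList _) b c]
  by_cases hm : c ∈ PySem.Set.ofList s.toList
  · rw [if_pos hm]
  · rw [if_neg hm]
    have : s.toList.count c = 0 := by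
      rw [List.count_eq_zero]
      intro hmem; exact hm ((PySem.Set.mem_ofList _ _).mpr hmem)
    rw [this]
    have := hnn c
    simp
    omega

lemma foldB_main (demand : List String) : ∀ (b : PySem.Dict Char Int) (m : Char → Nat),
    pvInv b → (∀ x, b.getD x 0 = (m x : Int)) →
    pvInv (demand.foldl minNumBoothsDayB b) ∧
    ∀ c, (demand.foldl minNumBoothsDayB b).getD c 0
      = ((demand.foldl (fun acc d => max acc (d.toList.count c)) (m c) : Nat) : Int) := by
  induction demand with
  | nil => intro b m h hm; exact ⟨h, fun c => hm c⟩
  | cons s rest ih =>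
    intro b m h hm
    simp only [List.foldl_cons]
    have hnn : ∀ x, 0 ≤ b.getD x 0 := fun x => (h.2 x).1
    have hday : ∀ x, (minNumBoothsDayB b s).getD x 0 = ((max (m x) (s.toList.count x) : Nat) : Int) := by
      intro x
      rw [dayB_getD b s x hnn, hm x]
      push_cast
      rfl
    have hinv : pvInv (minNumBoothsDayB b s) := by
      rw [minNumBoothsDayB]
      exact foldUpd_inv _ _ h
    exact ih _ _ hinv hday

-- ---- combining: a nodup key list with the same membership as res sums to res.length ----

lemma pv_final (demand : List String) (resA : List Char) (B : PySem.Dict Char Int)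
    (hA : ∀ c, resA.count c = pvMaxCnt demand c)
    (hBg : ∀ c, B.getD c 0 = (pvMaxCnt demand c : Int))
    (hBn : B.keys.Nodup)
    (hBm : ∀ c, c ∈ B.keys ↔ 0 < B.getD c 0) :
    (resA.length : Int) = B.values.sum := by
  rw [PySem.Dict.values_eq_map_keys B hBn 0]
  have hmap : B.keys.map (fun k => B.getD k 0) = B.keys.map (fun k => (resA.count k : Int)) := by
    apply List.map_congr_left
    intro k _
    rw [hBg k, hA k]
  rw [hmap]
  have hsum : (B.keys.map (fun k => (resA.count k : Int))).sum
      = ∑ c ∈ B.keys.toFinset, (resA.count c : Int) := by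
    rw [List.sum_toFinset _ hBn]
  rw [hsum]
  have hfs : B.keys.toFinset = resA.toFinset := by
    ext c
    simp only [List.mem_toFinset]
    rw [hBm c, hBg c, ← hA c]
    exact ⟨fun h => List.count_pos_iff.mp (by exact_mod_cast h),
           fun h => by exact_mod_cast List.count_pos_iff.mpr h⟩
  rw [hfs]
  rw [← List.sum_toFinset_count_eq_length resA]
  push_cast
  rfl

lemma pvInv_empty : pvInv PySem.Dict.empty := by
  constructor
  · simp [PySem.Dict.keys_empty]
  · intro c
    simp [PySem.Dict.getD_empty, PySem.Dict.keys_empty]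

-- ===== VERDICT (by name: the statement is the Claim_ definition above) =====
theorem minNumBooths_spec : Claim_equal_minNumBooths := by
  intro demand _
  unfold Spec_minNumBooths minNumBooths minNumBooths_alt
  obtain ⟨hinv, hgetD⟩ := foldB_main demand PySem.Dict.empty (fun _ => 0) pvInv_empty
    (by intro x; simp [PySem.Dict.getD_empty])
  exact pv_final demand _ _ (foldA_count demand) (fun c => hgetD c) hinv.1
    (fun c => (hinv.2 c).2)
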